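-- pv_equiv track=rewrite | github.com/SEGD940531/MNA_PSAC | 4.2/P2/source/converter_core.py | parse_int_strict
-- ===== SOURCE A (Python) =====
-- from typing import Optional
--
-- def parse_int_strict(text: str) -> Optional[int]:
--     """
--     Parse an integer from a string strictly.
--     Returns None if invalid.
--
--     Notes:
--     - Accepts leading/trailing spaces.
--     - Accepts optional '+' or '-' sign.
--     - Rejects floats/scientific notation and empty strings.
--     """
--     raw = text.strip()
--     if raw == "":
--         return None
--
--     sign = 1
--     if raw[0] in ("+", "-"):
--         if raw[0] == "-":
--             sign = -1
--         raw = raw[1:]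
--
--     if raw == "":
--         return None
--
--     # Validate all characters are digits (basic algorithm constraint)
--     for ch in raw:
--         if ch < "0" or ch > "9":
--             return None
--
--     value = 0
--     for ch in raw:
--         digit = ord(ch) - ord("0")
--         value = value * 10 + digit
--
--     return sign * value
-- ===== SOURCE B (Python) =====
-- def parse_int_strict(text):
--     raw = text.strip()
--     if raw[:1] in ("+", "-"):
--         sign, digits = (-1 if raw[0] == "-" else 1), raw[1:]
--     else:
--         sign, digits = 1, raw
--     if not digits:
--         return None
--     value, place = 0, 1
--     for ch in reversed(digits):
--         if ch < "0" or ch > "9":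
--             return None
--         value += (ord(ch) - 48) * place
--         place *= 10
--     return sign * value
-- ===== Notes on version B (the rewrite author's own statement) =====
-- stated objective: alternative
-- what changed: A validates the digits in one scan and then accumulates left-to-right with a separate Horner loop; B fuses validation and accumulation into a single right-to-left pass that adds digit*place while multiplying the place value by 10.
import Mathlib
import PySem

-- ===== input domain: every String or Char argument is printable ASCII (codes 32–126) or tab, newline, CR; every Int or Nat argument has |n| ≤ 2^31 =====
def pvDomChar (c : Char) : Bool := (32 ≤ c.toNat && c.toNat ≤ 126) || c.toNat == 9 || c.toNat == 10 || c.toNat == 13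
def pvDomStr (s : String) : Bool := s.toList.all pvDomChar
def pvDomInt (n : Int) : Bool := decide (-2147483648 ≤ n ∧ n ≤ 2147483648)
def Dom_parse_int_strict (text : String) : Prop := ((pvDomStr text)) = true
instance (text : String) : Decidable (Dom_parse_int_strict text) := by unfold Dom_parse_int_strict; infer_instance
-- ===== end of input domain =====

-- B replaces A's two passes (validation scan + Horner loop) with one fused right-to-left
-- digit*place accumulation pass — an alternative decomposition, same O(n) cost.


-- ===== PORT A =====
-- strip, empty check, sign extraction, a validation scan (early return = List.any), then a
-- left-to-right Horner accumulation — step for step A's code.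
def parse_int_strict (text : String) : Option Int :=
  let raw := PySem.Chars.strip text.toList
  if raw = [] then none
  else
    let h := raw.headD ' '
    let (sign, raw2) : Int × List Char :=
      if h = '+' ∨ h = '-' then ((if h = '-' then -1 else 1), raw.tail) else (1, raw)
    if raw2 = [] then none
    else if raw2.any (fun ch => decide (ch < '0') || decide ('9' < ch)) then none
    else some (sign * raw2.foldl (fun v ch => v * 10 + ((ch.toNat : Int) - 48)) 0)

-- ===== PORT B =====
-- B-side helper: the single fused right-to-left pass (validate + place-value accumulate).
def pvScanRev : List Char → Int → Int → Option Int
  | [], value, _ => some value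
  | ch :: rest, value, place =>
    if ch < '0' ∨ '9' < ch then none
    else pvScanRev rest (value + ((ch.toNat : Int) - 48) * place) (place * 10)

-- strip, sign split, then ONE pass over the digits from the right, multiplying by the place value.
def parse_int_strict_alt (text : String) : Option Int :=
  let raw := PySem.Chars.strip text.toList
  let (sign, digits) : Int × List Char :=
    match raw with
    | c :: rest => if c = '+' ∨ c = '-' then ((if c = '-' then -1 else 1), rest) else (1, raw)
    | [] => (1, raw)
  if digits = [] then none
  else (pvScanRev digits.reverse 0 1).map (fun v => sign * v)

-- ===== PRECONDITION & SPEC =====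
def Spec_parse_int_strict (text : String) (out : Option Int) : Prop := out = parse_int_strict_alt text
instance (text : String) (out : Option Int) : Decidable (Spec_parse_int_strict text out) := by unfold Spec_parse_int_strict; infer_instance

-- ===== CLAIM (what is proved, stated in full; the proofs are below) =====
def Claim_equal_parse_int_strict : Prop := ∀ (text : String), Dom_parse_int_strict text → Spec_parse_int_strict text (parse_int_strict text)

-- ===== LEMMAS AND PROOFS =====

-- value of a digit list read least-significant-first (what B's right-to-left pass accumulates)
def pvRevVal : List Char → Int
  | [] => 0
  | c :: rest => ((c.toNat : Int) - 48) + 10 * pvRevVal rest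

theorem pvScanRev_none_iff (rs : List Char) (v p : Int) :
    pvScanRev rs v p = none ↔ rs.any (fun ch => decide (ch < '0') || decide ('9' < ch)) = true := by
  induction rs generalizing v p with
  | nil => simp [pvScanRev]
  | cons c rest ih =>
    simp only [pvScanRev, List.any_cons]
    by_cases h : c < '0' ∨ '9' < c
    · simp [h]
    · push Not at h
      simp [ih, not_lt.mpr h.1, not_lt.mpr h.2]

theorem pvScanRev_good (rs : List Char) (v p : Int)
    (h : rs.any (fun ch => decide (ch < '0') || decide ('9' < ch)) = false) :
    pvScanRev rs v p = some (v + p * pvRevVal rs) := by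
  induction rs generalizing v p with
  | nil => simp [pvScanRev, pvRevVal]
  | cons c rest ih =>
    simp only [List.any_cons, Bool.or_eq_false_iff, decide_eq_false_iff_not, not_lt] at h
    obtain ⟨⟨h1, h2⟩, h3⟩ := h
    have hcond : ¬ (c < '0' ∨ '9' < c) := by push Not; exact ⟨h1, h2⟩
    rw [pvScanRev, if_neg hcond, ih _ _ (by simpa using h3), pvRevVal]
    congr 1
    ring

theorem pvRevVal_reverse (ds : List Char) :
    pvRevVal ds.reverse = ds.foldl (fun v ch => v * 10 + ((ch.toNat : Int) - 48)) 0 := by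
  induction ds using List.reverseRecOn with
  | nil => simp [pvRevVal]
  | append_singleton xs c ih =>
    rw [List.reverse_append, List.reverse_singleton, List.singleton_append, pvRevVal,
      List.foldl_append, ih]
    simp
    ring

-- ===== VERDICT (by name: the statement is the Claim_ definition above) =====
theorem parse_int_strict_spec : Claim_equal_parse_int_strict := by
  intro text _
  unfold Spec_parse_int_strict parse_int_strict parse_int_strict_alt
  cases hraw : PySem.Chars.strip text.toList with
  | nil => simp
  | cons c rest =>
    simp only [List.headD_cons, List.tail_cons, reduceCtorEq, if_false]
    by_cases hsign : c = '+' ∨ c = '-'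
    · simp only [hsign, if_true]
      cases hrest : rest with
      | nil => simp
      | cons d rs =>
        simp only [reduceCtorEq, if_false]
        by_cases hbad : (d :: rs).any (fun ch => decide (ch < '0') || decide ('9' < ch)) = true
        · rw [if_pos hbad]
          have : pvScanRev (d :: rs).reverse 0 1 = none := by
            rw [pvScanRev_none_iff, List.any_reverse]; exact hbad
          rw [this]; rfl
        · rw [if_neg hbad]
          rw [pvScanRev_good _ _ _ (by rw [List.any_reverse]; exact Bool.eq_false_iff.mpr hbad), pvRevVal_reverse]
          simp
    · simp only [hsign, if_false]
      by_cases hbad : (c :: rest).any (fun ch => decide (ch < '0') || decide ('9' < ch)) = true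
      · rw [if_pos hbad]
        have : pvScanRev (c :: rest).reverse 0 1 = none := by
          rw [pvScanRev_none_iff, List.any_reverse]; exact hbad
        rw [this]; rfl
      · rw [if_neg hbad]
        rw [pvScanRev_good _ _ _ (by rw [List.any_reverse]; exact Bool.eq_false_iff.mpr hbad), pvRevVal_reverse]
        simp
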